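-- pv_equiv track=rewrite | github.com/bilegole/project | 1.py | creat_datebase2
-- ===== SOURCE A (Python) =====
-- def creat_datebase2(need,mat=0):
-- 	mat1 = []
-- 	while need[-1] > 0 :
-- 		mat1.append(mat)
-- 		need[-1] = need[-1] -1
-- 	need.pop(-1)
-- 	bundle = [need , mat1]
-- 	return bundle
-- ===== SOURCE B (Python) =====
-- def creat_datebase2(need, mat=0):
--     x = need.pop(-1)
--     count = x if x > 0 else 0
--     return [need, [mat] * count]
-- ===== Notes on version B (the rewrite author's own statement) =====
-- stated objective: simpler
-- what changed: Replaces the count-down while loop (repeatedly decrementing need[-1] and appending mat) with popping the last element once and building the copies list by list multiplication with a closed-form count.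
import Mathlib
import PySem

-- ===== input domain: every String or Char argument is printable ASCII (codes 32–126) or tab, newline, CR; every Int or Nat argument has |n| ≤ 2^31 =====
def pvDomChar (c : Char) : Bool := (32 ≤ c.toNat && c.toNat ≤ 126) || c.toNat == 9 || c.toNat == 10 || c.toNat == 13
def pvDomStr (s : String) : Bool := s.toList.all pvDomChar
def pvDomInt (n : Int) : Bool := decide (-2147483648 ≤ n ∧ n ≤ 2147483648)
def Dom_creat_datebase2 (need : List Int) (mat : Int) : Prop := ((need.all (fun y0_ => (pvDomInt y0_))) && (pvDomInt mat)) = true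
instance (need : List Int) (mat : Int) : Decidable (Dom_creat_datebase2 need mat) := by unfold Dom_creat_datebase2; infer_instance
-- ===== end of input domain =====

-- B pops the last element once and builds [mat]*count by list multiplication instead of
-- A's decrement-and-append while loop (simpler; same return value). Both A and B mutate
-- `need` in place identically (pop of the last element); the theorem is about the return value.


-- ===== PORT A =====
-- A's while loop: only need[-1] is read and decremented, so the loop state is that
-- scalar plus mat1; each iteration appends mat and decrements, exactly as in A.
def creat_datebase2_loop (mat : Int) (k : Int) (mat1 : List Int) : List Int :=
  if k > 0 then creat_datebase2_loop mat (k - 1) (mat1 ++ [mat]) else mat1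
termination_by k.toNat
decreasing_by omega

def creat_datebase2 (need : List Int) (mat : Int) : List (List Int) :=
  match PySem.List.pyGet? need (-1) with          -- need[-1]; none = IndexError (outside Pre_)
  | none => []
  | some last =>
      let mat1 := creat_datebase2_loop mat last []
      [need.dropLast, mat1]                        -- need.pop(-1); bundle = [need, mat1]

-- ===== PORT B =====
def creat_datebase2_alt (need : List Int) (mat : Int) : List (List Int) :=
  match need.getLast? with                          -- x = need.pop(-1); none = IndexError (outside Pre_)
  | none => []
  | some x =>
      let count : Int := if x > 0 then x else 0
      [need.dropLast, List.replicate count.toNat mat]   -- [mat] * count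

-- ===== PRECONDITION & SPEC =====
-- A raises IndexError on empty need (need[-1]); excluded.
def Pre_creat_datebase2 (need : List Int) (mat : Int) : Prop := need ≠ []
instance (need : List Int) (mat : Int) : Decidable (Pre_creat_datebase2 need mat) := by unfold Pre_creat_datebase2; infer_instance
def pvWitness_creat_datebase2 : List Int × Int := ([2, 3], 5)

def Spec_creat_datebase2 (need : List Int) (mat : Int) (out : List (List Int)) : Prop := out = creat_datebase2_alt need mat
instance (need : List Int) (mat : Int) (out : List (List Int)) : Decidable (Spec_creat_datebase2 need mat out) := by unfold Spec_creat_datebase2; infer_instance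

-- ===== CLAIM (what is proved, stated in full; the proofs are below) =====
def Claim_equal_creat_datebase2 : Prop := ∀ (need : List Int) (mat : Int), Dom_creat_datebase2 need mat → Pre_creat_datebase2 need mat → Spec_creat_datebase2 need mat (creat_datebase2 need mat)

-- ===== LEMMAS AND PROOFS =====
theorem creat_datebase2_loop_eq (mat : Int) (k : Int) (mat1 : List Int) :
    creat_datebase2_loop mat k mat1 = mat1 ++ List.replicate k.toNat mat := by
  fun_induction creat_datebase2_loop mat k mat1 with
  | case1 k mat1 h ih =>
      have hk : k.toNat = (k - 1).toNat + 1 := by omega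
      rw [ih, hk, List.replicate_succ, List.append_assoc]
      rfl
  | case2 k mat1 h =>
      have hk : k.toNat = 0 := by omega
      simp [hk]

theorem pyGet_last (need : List Int) (h : need ≠ []) :
    PySem.List.pyGet? need (-1) = need.getLast? := by
  have hl : 0 < need.length := List.length_pos_iff.mpr h
  simp [PySem.List.pyGet?, PySem.List.pyIdx?]
  rw [if_pos (by omega), Option.bind_some, List.getLast?_eq_getElem?]

-- ===== VERDICT (by name: the statement is the Claim_ definition above) =====
theorem creat_datebase2_spec : Claim_equal_creat_datebase2 := by
  intro need mat _ hpre
  unfold Spec_creat_datebase2 creat_datebase2 creat_datebase2_alt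
  rw [pyGet_last need hpre]
  cases hx : need.getLast? with
  | none => rfl
  | some x =>
      simp only [creat_datebase2_loop_eq, List.nil_append]
      by_cases h : x > 0
      · simp [h]
      · have : x.toNat = 0 := by omega
        simp [h, this]
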